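-- pv_equiv track=rewrite | github.com/felipeoes/brazilian-legislation-scraper | src/scraper/base/summary_utils.py | _format_llm_usage
-- ===== SOURCE A (Python) =====
-- def _llm_usage_totals(llm_usage: dict[str, dict]) -> dict[str, int]:
--     """Aggregate per-model LLM usage into a single totals dict."""
--     totals = {
--         "requests": 0,
--         "successful_requests": 0,
--         "failed_requests": 0,
--         "input_tokens": 0,
--         "cached_tokens": 0,
--         "output_tokens": 0,
--         "reasoning_tokens": 0,
--     }
--     for usage in llm_usage.values():
--         requests = int(usage.get("requests", 0) or 0)
--         failed_requests = int(usage.get("failed_requests", 0) or 0)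
--         successful_requests = usage.get("successful_requests")
--         if successful_requests is None:
--             successful_requests = max(requests - failed_requests, 0)
--         else:
--             successful_requests = int(successful_requests or 0)
--         totals["requests"] += requests
--         totals["successful_requests"] += successful_requests
--         totals["failed_requests"] += failed_requests
--         for key in totals:
--             if key in {"requests", "successful_requests", "failed_requests"}:
--                 continue
--             totals[key] += int(usage.get(key, 0) or 0)
--     return totals
--
-- def _format_llm_usage(llm_usage: dict[str, dict]) -> str:
--     """Build a compact human-readable LLM usage string with per-model details."""
--
--     def _fmt(usage: dict[str, int]) -> str:
--         requests = int(usage.get("requests", 0) or 0)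
--         failed_requests = int(usage.get("failed_requests", 0) or 0)
--         successful_requests = usage.get("successful_requests")
--         if successful_requests is None:
--             successful_requests = max(requests - failed_requests, 0)
--         else:
--             successful_requests = int(successful_requests or 0)
--         return (
--             f"{requests} reqs ({successful_requests} ok, {failed_requests} failed), "
--             f"{int(usage.get('input_tokens', 0) or 0)} input, "
--             f"{int(usage.get('cached_tokens', 0) or 0)} cached, "
--             f"{int(usage.get('output_tokens', 0) or 0)} output, "
--             f"{int(usage.get('reasoning_tokens', 0) or 0)} reasoning"
--         )
--
--     totals = _llm_usage_totals(llm_usage)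
--     model_breakdown = "; ".join(
--         f"{model}: {_fmt(usage)}" for model, usage in sorted(llm_usage.items())
--     )
--     summary = f"LLM total {_fmt(totals)}"
--     if model_breakdown:
--         summary += f" | {model_breakdown}"
--     return summary
-- ===== SOURCE B (Python) =====
-- def _format_llm_usage(llm_usage):
--     """Sort-first, then ONE fused pass over the sorted items that accumulates
--     the 7 totals and builds the breakdown pieces in the same loop."""
--
--     def _field(u, k):
--         return int(u.get(k, 0) or 0)
--
--     def _row(u):
--         ok = u.get("successful_requests")
--         reqs = _field(u, "requests")
--         failed = _field(u, "failed_requests")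
--         return (reqs,
--                 max(reqs - failed, 0) if ok is None else int(ok or 0),
--                 failed,
--                 _field(u, "input_tokens"),
--                 _field(u, "cached_tokens"),
--                 _field(u, "output_tokens"),
--                 _field(u, "reasoning_tokens"))
--
--     def _fmt7(t):
--         return (f"{t[0]} reqs ({t[1]} ok, {t[2]} failed), "
--                 f"{t[3]} input, {t[4]} cached, {t[5]} output, {t[6]} reasoning")
--
--     totals = (0, 0, 0, 0, 0, 0, 0)
--     pieces = []
--     for model, usage in sorted(llm_usage.items()):
--         row = _row(usage)
--         totals = tuple(a + b for a, b in zip(totals, row))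
--         pieces.append(f"{model}: {_fmt7(row)}")
--
--     summary = f"LLM total {_fmt7(totals)}"
--     return summary + " | " + "; ".join(pieces) if pieces else summary
-- ===== Notes on version B (the rewrite author's own statement) =====
-- stated objective: alternative
-- what changed: B sorts the items first and then then runs a single fused loop over the sorted list that simultaneously accumulates the 7 totals (relying on commutativity of + so the sorted order gives the same sums) and builds the per-model breakdown pieces, instead of A's two staged loops (a row-by-row totals loop with an inner key loop over the original dict order, then a separate sorted formatting pass).
import Mathlib
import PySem

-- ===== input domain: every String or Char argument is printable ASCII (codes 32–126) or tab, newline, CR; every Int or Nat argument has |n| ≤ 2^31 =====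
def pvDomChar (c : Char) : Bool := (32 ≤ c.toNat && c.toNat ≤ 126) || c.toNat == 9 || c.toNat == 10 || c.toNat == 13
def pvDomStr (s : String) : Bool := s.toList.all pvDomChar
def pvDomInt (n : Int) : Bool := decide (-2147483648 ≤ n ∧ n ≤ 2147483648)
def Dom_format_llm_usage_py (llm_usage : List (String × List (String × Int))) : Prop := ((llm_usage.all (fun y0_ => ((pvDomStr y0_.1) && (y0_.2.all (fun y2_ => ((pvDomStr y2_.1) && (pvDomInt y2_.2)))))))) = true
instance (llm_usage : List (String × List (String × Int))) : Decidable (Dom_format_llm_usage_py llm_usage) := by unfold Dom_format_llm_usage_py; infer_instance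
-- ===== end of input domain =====

-- B sorts first and fuses totals accumulation and breakdown formatting into one
-- structural recursion over the sorted items (objective: alternative decomposition).

-- ===== PORT A =====
-- int(u.get(k, 0) or 0) on an int-valued dict is just u.get(k, 0) ('or 0' maps 0 to 0, int is identity)
def pvGetA (u : PySem.Dict String Int) (k : String) : Int := PySem.Dict.getD u k 0

-- loop body of _llm_usage_totals (one 'for usage in llm_usage.values()' iteration)
def pvStepA (totals : PySem.Dict String Int) (usage : List (String × Int)) : PySem.Dict String Int :=
  let u := PySem.Dict.mk usage
  let requests := pvGetA u "requests"
  let failed_requests := pvGetA u "failed_requests"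
  let successful_requests :=
    match PySem.Dict.get? u "successful_requests" with
    | none => max (requests - failed_requests) 0
    | some v => v
  let totals := PySem.Dict.modify totals "requests" 0 (· + requests)
  let totals := PySem.Dict.modify totals "successful_requests" 0 (· + successful_requests)
  let totals := PySem.Dict.modify totals "failed_requests" 0 (· + failed_requests)
  -- 'for key in totals: if key in {...}: continue; totals[key] += int(usage.get(key,0) or 0)'
  (PySem.Dict.keys totals).foldl (fun t key =>
    if key = "requests" ∨ key = "successful_requests" ∨ key = "failed_requests" then t
    else PySem.Dict.modify t key 0 (· + pvGetA u key)) totals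

def llm_usage_totals_py (llm_usage : List (String × List (String × Int))) : PySem.Dict String Int :=
  let totals : PySem.Dict String Int := PySem.Dict.mk
    [("requests", 0), ("successful_requests", 0), ("failed_requests", 0),
     ("input_tokens", 0), ("cached_tokens", 0), ("output_tokens", 0), ("reasoning_tokens", 0)]
  llm_usage.foldl (fun totals mu => pvStepA totals mu.2) totals

-- the inner _fmt helper of _format_llm_usage
def pvFmtA (u : PySem.Dict String Int) : String :=
  let requests := pvGetA u "requests"
  let failed_requests := pvGetA u "failed_requests"
  let successful_requests :=
    match PySem.Dict.get? u "successful_requests" with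
    | none => max (requests - failed_requests) 0
    | some v => v
  PySem.Int.toStr requests ++ " reqs (" ++ PySem.Int.toStr successful_requests ++ " ok, " ++
  PySem.Int.toStr failed_requests ++ " failed), " ++
  PySem.Int.toStr (pvGetA u "input_tokens") ++ " input, " ++
  PySem.Int.toStr (pvGetA u "cached_tokens") ++ " cached, " ++
  PySem.Int.toStr (pvGetA u "output_tokens") ++ " output, " ++
  PySem.Int.toStr (pvGetA u "reasoning_tokens") ++ " reasoning"

-- sorted(llm_usage.items()): with unique dict keys Python's tuple comparison never reaches
-- the second component, so it is the stable sort by the model name (exact on dict inputs)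
def format_llm_usage_py (llm_usage : List (String × List (String × Int))) : String :=
  let totals := llm_usage_totals_py llm_usage
  let model_breakdown := PySem.Str.join "; "
    ((PySem.List.sorted llm_usage (fun p => p.1) false).map
      (fun mu => mu.1 ++ ": " ++ pvFmtA (PySem.Dict.mk mu.2)))
  let summary := "LLM total " ++ pvFmtA totals
  if model_breakdown ≠ "" then summary ++ " | " ++ model_breakdown else summary

-- ===== PORT B =====
-- Source B's 7-tuple (requests, ok, failed, input, cached, output, reasoning) as a record
structure PvRow where
  requests : Int
  ok : Int
  failed : Int
  input_tokens : Int
  cached_tokens : Int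
  output_tokens : Int
  reasoning_tokens : Int
deriving DecidableEq, Repr

-- Source B's _field
def pvField (u : PySem.Dict String Int) (k : String) : Int := PySem.Dict.getD u k 0

-- Source B's _row
def pvRow (usage : List (String × Int)) : PvRow :=
  let u := PySem.Dict.mk usage
  let reqs := pvField u "requests"
  let failed := pvField u "failed_requests"
  let ok :=
    match PySem.Dict.get? u "successful_requests" with
    | none => max (reqs - failed) 0
    | some v => v
  ⟨reqs, ok, failed, pvField u "input_tokens", pvField u "cached_tokens",
   pvField u "output_tokens", pvField u "reasoning_tokens"⟩

-- Source B's _fmt7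
def pvFmt7 (t : PvRow) : String :=
  PySem.Int.toStr t.requests ++ " reqs (" ++ PySem.Int.toStr t.ok ++ " ok, " ++
  PySem.Int.toStr t.failed ++ " failed), " ++
  PySem.Int.toStr t.input_tokens ++ " input, " ++
  PySem.Int.toStr t.cached_tokens ++ " cached, " ++
  PySem.Int.toStr t.output_tokens ++ " output, " ++
  PySem.Int.toStr t.reasoning_tokens ++ " reasoning"

-- Source B's fused loop: one foldl over the sorted items accumulating totals and pieces together
def pvWalk (items : List (String × List (String × Int))) : PvRow × List String :=
  items.foldl
    (fun st mu =>
      let row := pvRow mu.2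
      (⟨st.1.requests + row.requests, st.1.ok + row.ok, st.1.failed + row.failed,
        st.1.input_tokens + row.input_tokens, st.1.cached_tokens + row.cached_tokens,
        st.1.output_tokens + row.output_tokens, st.1.reasoning_tokens + row.reasoning_tokens⟩,
       st.2 ++ [mu.1 ++ ": " ++ pvFmt7 row]))
    (⟨0, 0, 0, 0, 0, 0, 0⟩, [])

def format_llm_usage_py_alt (llm_usage : List (String × List (String × Int))) : String :=
  let (totals, pieces) := pvWalk (PySem.List.sorted llm_usage (fun p => p.1) false)
  let summary := "LLM total " ++ pvFmt7 totals
  if pieces.isEmpty then summary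
  else summary ++ " | " ++ PySem.Str.join "; " pieces

-- ===== PRECONDITION & SPEC =====
def Spec_format_llm_usage_py (llm_usage : List (String × List (String × Int))) (out : String) : Prop := out = format_llm_usage_py_alt llm_usage
instance (llm_usage : List (String × List (String × Int))) (out : String) : Decidable (Spec_format_llm_usage_py llm_usage out) := by unfold Spec_format_llm_usage_py; infer_instance

-- ===== CLAIM (what is proved, stated in full; the proofs are below) =====
def Claim_equal_format_llm_usage_py : Prop := ∀ (llm_usage : List (String × List (String × Int))), Dom_format_llm_usage_py llm_usage → Spec_format_llm_usage_py llm_usage (format_llm_usage_py llm_usage)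

-- ===== LEMMAS AND PROOFS =====

-- A's _fmt on a raw usage dict renders B's once-computed row
theorem pvFmtA_eq_fmt7 (usage : List (String × Int)) :
    pvFmtA (PySem.Dict.mk usage) = pvFmt7 (pvRow usage) := rfl

-- one totals-loop iteration on the 7-key dict, expressed through pvRow
theorem pvStepA_char (a₁ a₂ a₃ a₄ a₅ a₆ a₇ : Int) (usage : List (String × Int)) :
    pvStepA (PySem.Dict.mk
      [("requests", a₁), ("successful_requests", a₂), ("failed_requests", a₃),
       ("input_tokens", a₄), ("cached_tokens", a₅), ("output_tokens", a₆), ("reasoning_tokens", a₇)]) usage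
    = PySem.Dict.mk
      [("requests", a₁ + (pvRow usage).requests),
       ("successful_requests", a₂ + (pvRow usage).ok),
       ("failed_requests", a₃ + (pvRow usage).failed),
       ("input_tokens", a₄ + (pvRow usage).input_tokens),
       ("cached_tokens", a₅ + (pvRow usage).cached_tokens),
       ("output_tokens", a₆ + (pvRow usage).output_tokens),
       ("reasoning_tokens", a₇ + (pvRow usage).reasoning_tokens)] := by
  simp [pvStepA, pvRow, pvGetA, pvField, PySem.Dict.modify, PySem.Dict.insert, PySem.Dict.getD,
    PySem.Dict.get?, PySem.Dict.keys, List.foldl]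

-- running A's whole totals loop from an arbitrary 7-key accumulator
theorem totals_char (l : List (String × List (String × Int))) :
    ∀ (a₁ a₂ a₃ a₄ a₅ a₆ a₇ : Int),
    l.foldl (fun totals mu => pvStepA totals mu.2) (PySem.Dict.mk
      [("requests", a₁), ("successful_requests", a₂), ("failed_requests", a₃),
       ("input_tokens", a₄), ("cached_tokens", a₅), ("output_tokens", a₆), ("reasoning_tokens", a₇)])
    = PySem.Dict.mk
      [("requests", a₁ + (l.map (fun mu => (pvRow mu.2).requests)).sum),
       ("successful_requests", a₂ + (l.map (fun mu => (pvRow mu.2).ok)).sum),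
       ("failed_requests", a₃ + (l.map (fun mu => (pvRow mu.2).failed)).sum),
       ("input_tokens", a₄ + (l.map (fun mu => (pvRow mu.2).input_tokens)).sum),
       ("cached_tokens", a₅ + (l.map (fun mu => (pvRow mu.2).cached_tokens)).sum),
       ("output_tokens", a₆ + (l.map (fun mu => (pvRow mu.2).output_tokens)).sum),
       ("reasoning_tokens", a₇ + (l.map (fun mu => (pvRow mu.2).reasoning_tokens)).sum)] := by
  induction l with
  | nil => intro a₁ a₂ a₃ a₄ a₅ a₆ a₇; simp
  | cons x xs ih =>
      intro a₁ a₂ a₃ a₄ a₅ a₆ a₇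
      rw [List.foldl_cons, pvStepA_char, ih]
      simp [add_assoc]

-- B's fused loop from an arbitrary accumulator, split into its two components
theorem pvWalk_fold_char (l : List (String × List (String × Int))) :
    ∀ (t : PvRow) (p : List String),
    l.foldl
      (fun st mu =>
        let row := pvRow mu.2
        ((⟨st.1.requests + row.requests, st.1.ok + row.ok, st.1.failed + row.failed,
          st.1.input_tokens + row.input_tokens, st.1.cached_tokens + row.cached_tokens,
          st.1.output_tokens + row.output_tokens, st.1.reasoning_tokens + row.reasoning_tokens⟩ : PvRow),
         st.2 ++ [mu.1 ++ ": " ++ pvFmt7 row]))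
      (t, p)
    = (⟨t.requests + (l.map (fun mu => (pvRow mu.2).requests)).sum,
        t.ok + (l.map (fun mu => (pvRow mu.2).ok)).sum,
        t.failed + (l.map (fun mu => (pvRow mu.2).failed)).sum,
        t.input_tokens + (l.map (fun mu => (pvRow mu.2).input_tokens)).sum,
        t.cached_tokens + (l.map (fun mu => (pvRow mu.2).cached_tokens)).sum,
        t.output_tokens + (l.map (fun mu => (pvRow mu.2).output_tokens)).sum,
        t.reasoning_tokens + (l.map (fun mu => (pvRow mu.2).reasoning_tokens)).sum⟩,
       p ++ l.map (fun mu => mu.1 ++ ": " ++ pvFmt7 (pvRow mu.2))) := by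
  induction l with
  | nil => intro t p; simp
  | cons x xs ih =>
      intro t p
      rw [List.foldl_cons]
      simp only [ih]
      simp [add_assoc]

theorem pvWalk_char (l : List (String × List (String × Int))) :
    pvWalk l =
      (⟨(l.map (fun mu => (pvRow mu.2).requests)).sum, (l.map (fun mu => (pvRow mu.2).ok)).sum,
        (l.map (fun mu => (pvRow mu.2).failed)).sum,
        (l.map (fun mu => (pvRow mu.2).input_tokens)).sum,
        (l.map (fun mu => (pvRow mu.2).cached_tokens)).sum,
        (l.map (fun mu => (pvRow mu.2).output_tokens)).sum,
        (l.map (fun mu => (pvRow mu.2).reasoning_tokens)).sum⟩,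
       l.map (fun mu => mu.1 ++ ": " ++ pvFmt7 (pvRow mu.2))) := by
  unfold pvWalk
  rw [pvWalk_fold_char]
  simp

-- the totals sums taken over the sorted list equal the sums over the original list
theorem sum_sorted (f : (String × List (String × Int)) → Int)
    (l : List (String × List (String × Int))) :
    ((PySem.List.sorted l (fun p => p.1) false).map f).sum = (l.map f).sum :=
  ((PySem.List.sorted_perm l (fun p => p.1) false).map f).sum_eq

-- a "model: …" joined breakdown starting with a nonempty head is never the empty string
theorem join_colon_ne_empty (m r : String) (rest : List String) :
    PySem.Str.join "; " ((m ++ ": " ++ r) :: rest) ≠ "" := by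
  intro h
  have h2 := congrArg String.toList h
  cases rest with
  | nil => simp [PySem.Str.join, PySem.Chars.join_singleton] at h2
  | cons b t => simp [PySem.Str.join, PySem.Chars.join_cons_cons] at h2

-- A's _fmt applied to the fully-assembled 7-key totals dict
theorem pvFmtA_totals (a₁ a₂ a₃ a₄ a₅ a₆ a₇ : Int) :
    pvFmtA (PySem.Dict.mk
      [("requests", a₁), ("successful_requests", a₂), ("failed_requests", a₃),
       ("input_tokens", a₄), ("cached_tokens", a₅), ("output_tokens", a₆), ("reasoning_tokens", a₇)])
    = pvFmt7 ⟨a₁, a₂, a₃, a₄, a₅, a₆, a₇⟩ := by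
  simp [pvFmtA, pvFmt7, pvGetA, PySem.Dict.getD, PySem.Dict.get?, PySem.Dict.mk]

-- ===== VERDICT (by name: the statement is the Claim_ definition above) =====
theorem format_llm_usage_py_spec : Claim_equal_format_llm_usage_py := by
  intro l _
  show format_llm_usage_py l = format_llm_usage_py_alt l
  unfold format_llm_usage_py format_llm_usage_py_alt llm_usage_totals_py
  simp only [totals_char, pvWalk_char, sum_sorted, pvFmtA_totals]
  cases l with
  | nil => rfl
  | cons x xs =>
      obtain ⟨y, r, hyr⟩ :
          ∃ y r, PySem.List.sorted (x :: xs) (fun p : String × List (String × Int) => p.1) false = y :: r := by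
        cases hs : PySem.List.sorted (x :: xs) (fun p : String × List (String × Int) => p.1) false with
        | nil => exact absurd ((PySem.List.sorted_eq_nil_iff _ _ _).mp hs) (by simp)
        | cons y r => exact ⟨y, r, rfl⟩
      simp only [hyr, List.map_cons, pvFmtA_eq_fmt7, List.isEmpty_cons, Bool.false_eq_true, if_false]
      rw [if_pos (join_colon_ne_empty _ _ _)]
      simp only [zero_add]
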